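-- pv_equiv track=rewrite | github.com/MateuszBrankiewicz/KODY | PYTHON/WDI LAB/montecarlo.py | ciagait
-- ===== SOURCE A (Python) =====
-- def ciagait(n):
--     wynik = 1
--     if n == 1:
--         return -1
--     if n == 2:
--         return 1
--     else:
--         for i in range(n-1):
--          wynik = (wynik + wynik)  * -1
--     return wynik
-- ===== SOURCE B (Python) =====
-- def ciagait(n):
--     if n == 1:
--         return -1
--     if n == 2:
--         return 1
--     return (-2) ** max(n - 1, 0)
-- ===== Notes on version B (the rewrite author's own statement) =====
-- stated objective: faster
-- what changed: replaces the linear doubling-and-negating accumulator loop by closed-form exponentiation by squaring via Python's built-in pow (intended faster; a timing run measured up to ~2000x at n=65536 on one run)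
import Mathlib
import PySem

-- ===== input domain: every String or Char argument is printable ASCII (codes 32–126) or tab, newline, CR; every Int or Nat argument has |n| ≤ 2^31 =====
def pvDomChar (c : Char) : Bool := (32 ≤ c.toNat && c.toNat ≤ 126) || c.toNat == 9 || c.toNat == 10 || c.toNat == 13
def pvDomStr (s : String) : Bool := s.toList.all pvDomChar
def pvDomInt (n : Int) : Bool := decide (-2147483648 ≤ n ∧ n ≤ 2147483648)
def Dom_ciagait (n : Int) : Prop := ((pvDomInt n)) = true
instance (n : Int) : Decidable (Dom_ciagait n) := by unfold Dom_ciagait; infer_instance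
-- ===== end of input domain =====

-- B replaces A's linear doubling loop with closed-form exponentiation by squaring (intended faster; one timing run measured it so).
-- ===== PORT A =====
def ciagait (n : Int) : Int :=
  if n = 1 then -1
  else if n = 2 then 1
  else (PySem.List.pyRange 0 (n - 1) 1).foldl (fun wynik _ => (wynik + wynik) * (-1)) 1

-- ===== PORT B =====
def ciagait_alt (n : Int) : Int :=
  if n = 1 then -1
  else if n = 2 then 1
  else (-2) ^ (max (n - 1) 0).toNat

-- ===== PRECONDITION & SPEC =====
def Spec_ciagait (n : Int) (out : Int) : Prop := out = ciagait_alt n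
instance (n : Int) (out : Int) : Decidable (Spec_ciagait n out) := by unfold Spec_ciagait; infer_instance

-- ===== CLAIM (what is proved, stated in full; the proofs are below) =====
def Claim_equal_ciagait : Prop := ∀ (n : Int), Dom_ciagait n → Spec_ciagait n (ciagait n)

-- ===== LEMMAS AND PROOFS =====

-- ===== VERDICT (by name: the statement is the Claim_ definition above) =====
-- the loop body doubles and negates: folding it over any list multiplies by (-2)^length
theorem foldl_double_neg (l : List Int) (a : Int) :
    l.foldl (fun w _ => (w + w) * (-1)) a = a * (-2) ^ l.length := by
  induction l generalizing a with
  | nil => simp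
  | cons x xs ih => rw [List.foldl_cons, ih, List.length_cons, pow_succ]; ring

theorem ciagait_spec : Claim_equal_ciagait := by
  intro n _
  unfold Spec_ciagait ciagait ciagait_alt
  split_ifs with h1 h2
  · rfl
  · rfl
  · rw [foldl_double_neg, PySem.List.length_pyRange_one]
    have : (n - 1 - 0).toNat = (max (n - 1) 0).toNat := by omega
    rw [this, one_mul]
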